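-- pv_equiv track=rewrite | github.com/0xPuddi/Algorithms | src/algos/better_algo_280.py | algo_x
-- ===== SOURCE A (Python) =====
-- def algo_x(A: list[int], B: list[int]):
--     for l in range(len(A) - 1, -1, -1):
--         for j in range(len(B)):
--             for i in range(0, len(A) - l + 1):
--                 s = 0
--                 for k in range(i, i + l - 1):
--                     s = s + A[k]
--
--                 if s == B[j]:
--                     return l
--     return 0
-- ===== SOURCE B (Python) =====
-- def algo_x(A: list[int], B: list[int]):
--     n = len(A)
--     P = [0]
--     for x in A:
--         P.append(P[-1] + x)
--     Bset = set(B)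
--     for l in range(n - 1, 0, -1):
--         if any(P[i + l - 1] - P[i] in Bset for i in range(n - l + 1)):
--             return l
--     return 0
-- ===== Notes on version B (the rewrite author's own statement) =====
-- stated objective: faster
-- what changed: Replaces the quadruple loop (recompute each window sum element by element, once per element of B) by one prefix-sum array and a hash set of B, so each candidate length is checked in O(n) and B is scanned once.
import Mathlib
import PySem

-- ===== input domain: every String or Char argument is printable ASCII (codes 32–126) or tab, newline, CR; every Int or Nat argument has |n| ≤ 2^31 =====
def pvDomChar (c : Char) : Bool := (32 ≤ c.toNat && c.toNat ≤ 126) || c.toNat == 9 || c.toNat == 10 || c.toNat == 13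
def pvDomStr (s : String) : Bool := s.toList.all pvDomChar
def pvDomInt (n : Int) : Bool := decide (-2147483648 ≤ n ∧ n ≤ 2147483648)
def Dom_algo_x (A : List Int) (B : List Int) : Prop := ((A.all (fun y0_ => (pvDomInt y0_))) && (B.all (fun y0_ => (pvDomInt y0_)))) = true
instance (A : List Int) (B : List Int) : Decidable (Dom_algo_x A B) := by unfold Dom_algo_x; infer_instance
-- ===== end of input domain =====

-- B replaces A's quadruple loop by prefix sums and a set of B (asymptotically faster; measured by the check).

-- ===== PORT A =====
def algo_x (A : List Int) (B : List Int) : Int :=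
  match (PySem.List.pyRange ((A.length : Int) - 1) (-1) (-1)).find? (fun l =>
    (PySem.List.pyRange 0 (B.length : Int) 1).any (fun j =>
      (PySem.List.pyRange 0 ((A.length : Int) - l + 1) 1).any (fun i =>
        ((PySem.List.pyRange i (i + l - 1) 1).foldl
            (fun s k => s + PySem.List.pyGetD A k 0) 0)
          == PySem.List.pyGetD B j 0))) with
  | some l => l
  | none => 0

-- ===== PORT B =====
def algo_x_alt (A : List Int) (B : List Int) : Int :=
  let n : Int := A.length
  let P : List Int := A.foldl (fun P x => P ++ [P.getLast?.getD 0 + x]) [0]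
  let Bset : PySem.Set Int := PySem.Set.ofList B
  match (PySem.List.pyRange (n - 1) 0 (-1)).find? (fun l =>
    (PySem.List.pyRange 0 (n - l + 1) 1).any (fun i =>
      PySem.Set.contains Bset
        (PySem.List.pyGetD P (i + l - 1) 0 - PySem.List.pyGetD P i 0))) with
  | some l => l
  | none => 0

-- ===== PRECONDITION & SPEC =====
def Spec_algo_x (A : List Int) (B : List Int) (out : Int) : Prop := out = algo_x_alt A B
instance (A : List Int) (B : List Int) (out : Int) : Decidable (Spec_algo_x A B out) := by unfold Spec_algo_x; infer_instance

-- ===== CLAIM (what is proved, stated in full; the proofs are below) =====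
def Claim_equal_algo_x : Prop := ∀ (A : List Int) (B : List Int), Dom_algo_x A B → Spec_algo_x A B (algo_x A B)

-- ===== LEMMAS AND PROOFS =====

/-- Partial sums of `xs` continuing from accumulator `a` (proof helper). -/
def presums (a : Int) : List Int → List Int
  | [] => []
  | x :: xs => (a + x) :: presums (a + x) xs

theorem presums_foldl : ∀ (A P0 : List Int) (a : Int), P0.getLast? = some a →
    A.foldl (fun P x => P ++ [P.getLast?.getD 0 + x]) P0 = P0 ++ presums a A := by
  intro A
  induction A with
  | nil => intro P0 a h; simp [presums]
  | cons x xs ih =>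
    intro P0 a h
    have h1 : (P0 ++ [a + x]).getLast? = some (a + x) := by
      simp [List.getLast?_append]
    calc (x :: xs).foldl (fun P x => P ++ [P.getLast?.getD 0 + x]) P0
        = xs.foldl (fun P x => P ++ [P.getLast?.getD 0 + x]) (P0 ++ [a + x]) := by
          simp [List.foldl_cons, h]
      _ = (P0 ++ [a + x]) ++ presums (a + x) xs := ih _ _ h1
      _ = P0 ++ presums a (x :: xs) := by simp [presums]

theorem presums_getElem? : ∀ (xs : List Int) (a : Int) (k : Nat), k < xs.length →
    (presums a xs)[k]? = some (a + (xs.take (k + 1)).sum) := by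
  intro xs
  induction xs with
  | nil => intro a k h; simp at h
  | cons x xs ih =>
    intro a k h
    cases k with
    | zero => simp [presums]
    | succ k =>
      have := ih (a + x) k (by simpa using h)
      simp [presums, this, add_assoc]

/-- The prefix list B builds, indexed: entry `k` is the sum of the first `k` elements. -/
theorem prefix_get (A : List Int) (k : Nat) (hk : k ≤ A.length) :
    PySem.List.pyGetD (A.foldl (fun P x => P ++ [P.getLast?.getD 0 + x]) [0]) (k : Int) 0
      = (A.take k).sum := by
  rw [presums_foldl A [0] 0 (by simp)]
  rw [PySem.List.pyGetD_of_nonneg _ _ (by positivity)]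
  cases k with
  | zero => simp
  | succ k =>
    have h : ([(0 : Int)] ++ presums 0 A).getD (k + 1) 0 = (presums 0 A).getD k 0 := by
      simp [List.getD]
    rw [Int.toNat_natCast, h, List.getD_eq_getElem?_getD,
      presums_getElem? A 0 k (by omega)]
    simp

/-- A's innermost element-by-element window sum equals a difference of prefix sums. -/
theorem window_sum (A : List Int) : ∀ (m : Nat) (a b s : Int), 0 ≤ a → a ≤ b →
    b ≤ (A.length : Int) → (b - a).toNat = m →
    (PySem.List.pyRange a b 1).foldl (fun s k => s + PySem.List.pyGetD A k 0) s
      = s + (A.take b.toNat).sum - (A.take a.toNat).sum := by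
  intro m
  induction m with
  | zero =>
    intro a b s h0 hab hb hm
    have : b = a := by omega
    subst this
    simp [PySem.List.pyRange_one_eq_nil (le_refl _)]
  | succ m ih =>
    intro a b s h0 hab hb hm
    have hlt : a < b := by omega
    rw [PySem.List.pyRange_one_cons hlt, List.foldl_cons]
    rw [ih (a + 1) b _ (by omega) (by omega) hb (by omega)]
    have hlen : a.toNat < A.length := by omega
    have ha : PySem.List.pyGetD A a 0 = A[a.toNat] := by
      rw [PySem.List.pyGetD_of_nonneg _ _ h0, List.getD_eq_getElem?_getD,
        List.getElem?_eq_getElem hlen]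
      rfl
    have hsum : (A.take (a.toNat + 1)).sum = (A.take a.toNat).sum + A[a.toNat] := by
      rw [List.take_add_one, List.sum_append]
      simp [List.getElem?_eq_getElem hlen]
    have hto : (a + 1).toNat = a.toNat + 1 := by omega
    rw [hto, hsum, ha]
    ring

theorem find?_congr_mem {α : Type} (l : List α) (p q : α → Bool)
    (h : ∀ x ∈ l, p x = q x) : l.find? p = l.find? q := by
  induction l with
  | nil => rfl
  | cons x xs ih =>
    simp only [List.find?_cons]
    rw [h x (by simp)]
    cases hq : q x with
    | true => rfl
    | false => exact ih (fun y hy => h y (by simp [hy]))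

/-- For any candidate length `l ≥ 1`, A's predicate equals B's predicate. -/
theorem pred_eq (A B : List Int) (l : Int) (h1 : 1 ≤ l) (hn : l ≤ (A.length : Int) - 1) :
    ((PySem.List.pyRange 0 (B.length : Int) 1).any (fun j =>
      (PySem.List.pyRange 0 ((A.length : Int) - l + 1) 1).any (fun i =>
        ((PySem.List.pyRange i (i + l - 1) 1).foldl
            (fun s k => s + PySem.List.pyGetD A k 0) 0)
          == PySem.List.pyGetD B j 0)))
    = ((PySem.List.pyRange 0 ((A.length : Int) - l + 1) 1).any (fun i =>
        PySem.Set.contains (PySem.Set.ofList B)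
          (PySem.List.pyGetD (A.foldl (fun P x => P ++ [P.getLast?.getD 0 + x]) [0]) (i + l - 1) 0
            - PySem.List.pyGetD (A.foldl (fun P x => P ++ [P.getLast?.getD 0 + x]) [0]) i 0))) := by
  rw [Bool.eq_iff_iff]
  simp only [List.any_eq_true, PySem.List.mem_pyRange_one, beq_iff_eq]
  constructor
  · rintro ⟨j, ⟨hj0, hjB⟩, i, ⟨hi0, hiN⟩, hsum⟩
    refine ⟨i, ⟨hi0, hiN⟩, ?_⟩
    have hw : (PySem.List.pyRange i (i + l - 1) 1).foldl
        (fun s k => s + PySem.List.pyGetD A k 0) 0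
        = (A.take (i + l - 1).toNat).sum - (A.take i.toNat).sum := by
      have := window_sum A ((i + l - 1) - i).toNat i (i + l - 1) 0 hi0 (by omega) (by omega) rfl
      simpa using this
    have hP1 : PySem.List.pyGetD (A.foldl (fun P x => P ++ [P.getLast?.getD 0 + x]) [0]) (i + l - 1) 0
        = (A.take (i + l - 1).toNat).sum := by
      have := prefix_get A (i + l - 1).toNat (by omega)
      rwa [Int.toNat_of_nonneg (by omega)] at this
    have hP2 : PySem.List.pyGetD (A.foldl (fun P x => P ++ [P.getLast?.getD 0 + x]) [0]) i 0
        = (A.take i.toNat).sum := by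
      have := prefix_get A i.toNat (by omega)
      rwa [Int.toNat_of_nonneg hi0] at this
    rw [hP1, hP2, ← hw, hsum]
    have hmem : PySem.List.pyGetD B j 0 ∈ B := by
      rw [PySem.List.pyGetD_of_nonneg _ _ hj0]
      have hjlt : j.toNat < B.length := by omega
      simp [List.getD_eq_getElem?_getD, List.getElem?_eq_getElem hjlt]
    simpa [PySem.Set.contains, List.contains_iff_mem, PySem.Set.mem_ofList] using hmem
  · rintro ⟨i, ⟨hi0, hiN⟩, hc⟩
    have hmem : (PySem.List.pyGetD (A.foldl (fun P x => P ++ [P.getLast?.getD 0 + x]) [0]) (i + l - 1) 0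
        - PySem.List.pyGetD (A.foldl (fun P x => P ++ [P.getLast?.getD 0 + x]) [0]) i 0) ∈ B := by
      have := hc
      simpa [PySem.Set.contains, List.contains_iff_mem, PySem.Set.mem_ofList] using this
    obtain ⟨j, hjlt, hj⟩ := List.mem_iff_getElem.mp hmem
    refine ⟨(j : Int), ⟨by positivity, by exact_mod_cast hjlt⟩, i, ⟨hi0, hiN⟩, ?_⟩
    have hw : (PySem.List.pyRange i (i + l - 1) 1).foldl
        (fun s k => s + PySem.List.pyGetD A k 0) 0
        = (A.take (i + l - 1).toNat).sum - (A.take i.toNat).sum := by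
      have := window_sum A ((i + l - 1) - i).toNat i (i + l - 1) 0 hi0 (by omega) (by omega) rfl
      simpa using this
    have hP1 : PySem.List.pyGetD (A.foldl (fun P x => P ++ [P.getLast?.getD 0 + x]) [0]) (i + l - 1) 0
        = (A.take (i + l - 1).toNat).sum := by
      have := prefix_get A (i + l - 1).toNat (by omega)
      rwa [Int.toNat_of_nonneg (by omega)] at this
    have hP2 : PySem.List.pyGetD (A.foldl (fun P x => P ++ [P.getLast?.getD 0 + x]) [0]) i 0
        = (A.take i.toNat).sum := by
      have := prefix_get A i.toNat (by omega)
      rwa [Int.toNat_of_nonneg hi0] at this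
    have hgB : PySem.List.pyGetD B (j : Int) 0 = B[j] := by
      rw [PySem.List.pyGetD_of_nonneg _ _ (by positivity)]
      simp [List.getD_eq_getElem?_getD, List.getElem?_eq_getElem hjlt]
    rw [hw, hgB, hj, hP1, hP2]

theorem countdown_split (n : Int) (hn : 1 ≤ n) :
    PySem.List.pyRange (n - 1) (-1) (-1) = PySem.List.pyRange (n - 1) 0 (-1) ++ [0] := by
  rw [PySem.List.pyRange_neg_one, PySem.List.pyRange_neg_one]
  have h1 : (n - 1 - (-1)).toNat = (n - 1 - 0).toNat + 1 := by omega
  rw [h1, List.range_succ]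
  simp only [List.map_append, List.map_cons, List.map_nil]
  congr 1
  congr 1
  omega

-- ===== VERDICT (by name: the statement is the Claim_ definition above) =====
theorem algo_x_spec : Claim_equal_algo_x := by
  intro A B _
  unfold Spec_algo_x algo_x
  simp only [algo_x_alt]
  by_cases hA : A.length = 0
  · rw [hA]
    simp
  · have hn : 1 ≤ (A.length : Int) := by omega
    rw [countdown_split _ hn, List.find?_append]
    rw [find?_congr_mem (PySem.List.pyRange ((A.length : Int) - 1) 0 (-1)) _ _
      (fun l hl => by
        have hm := PySem.List.mem_pyRange_neg_one.mp hl
        exact pred_eq A B l (by omega) (by omega))]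
    cases hfind : (PySem.List.pyRange ((A.length : Int) - 1) 0 (-1)).find? (fun l =>
        (PySem.List.pyRange 0 ((A.length : Int) - l + 1) 1).any (fun i =>
          PySem.Set.contains (PySem.Set.ofList B)
            (PySem.List.pyGetD (A.foldl (fun P x => P ++ [P.getLast?.getD 0 + x]) [0]) (i + l - 1) 0
              - PySem.List.pyGetD (A.foldl (fun P x => P ++ [P.getLast?.getD 0 + x]) [0]) i 0))) with
    | some l => simp
    | none =>
      simp only [Option.none_or]
      split
      next l heq =>
        have := List.mem_of_find?_eq_some heq
        simp at this
        simp [this]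
      next => rfl
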